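-- pv_equiv track=rewrite | github.com/pypi-data/pypi-mirror-87 | packages/pyCRAC/pyCRAC-1.5.0.tar.gz/pyCRAC-1.5.0/pyCRAC/Classes/Counters.py | __mutsAnnotationString
-- ===== SOURCE A (Python) =====
-- def __mutsAnnotationString(substitutions,deletions):
-- 	"""Makes a CIGAR-type string for mutations in cDNAs"""
-- 	mutlist = list()
-- 	for pos in sorted(set(substitutions+deletions)):
-- 		subsstring = str()
-- 		delsstring = str()
-- 		if pos in substitutions : subsstring = "S"
-- 		if pos in deletions		: delsstring = "D"
-- 		mutsstring = "%s%s%s" % (pos+1,subsstring,delsstring)	# add 1 to convert them to 1-based coordinates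
-- 		if subsstring or delsstring:
-- 			mutlist.append(mutsstring)
-- 	if mutlist:
-- 		return ",".join(mutlist)
-- 	else:
-- 		return None
-- ===== SOURCE B (Python) =====
-- def __mutsAnnotationString(substitutions, deletions):
-- 	"""Makes a CIGAR-type string for mutations in cDNAs"""
-- 	subs = sorted(set(substitutions))
-- 	dels = sorted(set(deletions))
-- 	parts = []
-- 	i = j = 0
-- 	while i < len(subs) or j < len(dels):
-- 		if j >= len(dels) or (i < len(subs) and subs[i] < dels[j]):
-- 			parts.append("%sS" % (subs[i] + 1)); i += 1
-- 		elif i >= len(subs) or dels[j] < subs[i]: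
-- 			parts.append("%sD" % (dels[j] + 1)); j += 1
-- 		else:
-- 			parts.append("%sSD" % (subs[i] + 1)); i += 1; j += 1
-- 	if parts:
-- 		return ",".join(parts)
-- 	return None
-- ===== Notes on version B (the rewrite author's own statement) =====
-- stated objective: faster
-- what changed: Instead of A's single sorted union with per-position membership scans of the raw lists, B sorts the two deduplicated lists separately and emits the annotation fragments in one two-pointer merge pass ('S' / 'D' / 'SD' decided by the comparison), so no membership test over the input lists remains.
import Mathlib
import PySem

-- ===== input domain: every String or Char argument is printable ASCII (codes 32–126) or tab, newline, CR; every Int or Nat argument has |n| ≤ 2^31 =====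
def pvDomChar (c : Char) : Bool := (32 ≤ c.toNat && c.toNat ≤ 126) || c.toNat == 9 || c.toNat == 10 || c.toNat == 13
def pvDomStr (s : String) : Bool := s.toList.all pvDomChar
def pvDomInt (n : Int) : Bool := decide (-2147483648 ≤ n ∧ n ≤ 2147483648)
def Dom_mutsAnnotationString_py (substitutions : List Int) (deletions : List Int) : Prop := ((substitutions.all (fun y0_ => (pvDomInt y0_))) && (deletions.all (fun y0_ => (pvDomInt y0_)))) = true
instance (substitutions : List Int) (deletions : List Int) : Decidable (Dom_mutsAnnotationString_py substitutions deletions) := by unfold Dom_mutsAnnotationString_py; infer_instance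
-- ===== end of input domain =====

-- B replaces A's membership scans over the sorted union by a two-pointer merge of the two
-- independently sorted, deduplicated position lists (objective: faster).

-- ===== PORT A =====
def mutsAnnotationString_py (substitutions : List Int) (deletions : List Int) : Option String :=
  let mutlist := (PySem.List.sorted (PySem.Set.ofList (substitutions ++ deletions)) (fun x => x) false).foldl
    (fun mutlist pos =>
      let subsstring : String := if pos ∈ substitutions then "S" else ""
      let delsstring : String := if pos ∈ deletions then "D" else ""
      let mutsstring : String := PySem.Int.toStr (pos + 1) ++ subsstring ++ delsstring
      if subsstring ≠ "" ∨ delsstring ≠ "" then mutlist ++ [mutsstring] else mutlist) []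
  if mutlist ≠ [] then some (PySem.Str.join "," mutlist) else none

-- ===== PORT B =====
-- B's while loop over indices i,j, transcribed as the equivalent recursion on the two
-- (sorted, deduplicated) suffix lists; the branch tests are the same comparisons.
-- Fuel only makes the recursion structural: one loop iteration consumes at least one element,
-- so subs.length + dels.length steps always suffice (the fuel-0 branch is unreachable).
def mutsMergeF : Nat → List Int → List Int → List String
  | 0, _, _ => []
  | _ + 1, [], [] => []
  | n + 1, p :: xs, [] => (PySem.Int.toStr (p + 1) ++ "S") :: mutsMergeF n xs []
  | n + 1, [], q :: ys => (PySem.Int.toStr (q + 1) ++ "D") :: mutsMergeF n [] ys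
  | n + 1, p :: xs, q :: ys =>
    if p < q then (PySem.Int.toStr (p + 1) ++ "S") :: mutsMergeF n xs (q :: ys)
    else if q < p then (PySem.Int.toStr (q + 1) ++ "D") :: mutsMergeF n (p :: xs) ys
    else (PySem.Int.toStr (p + 1) ++ "SD") :: mutsMergeF n xs ys

def mutsAnnotationString_py_alt (substitutions : List Int) (deletions : List Int) : Option String :=
  let subs := PySem.List.sorted (PySem.Set.ofList substitutions) (fun x => x) false
  let dels := PySem.List.sorted (PySem.Set.ofList deletions) (fun x => x) false
  let parts := mutsMergeF (subs.length + dels.length) subs dels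
  if parts ≠ [] then some (PySem.Str.join "," parts) else none

-- ===== PRECONDITION & SPEC =====
def Spec_mutsAnnotationString_py (substitutions : List Int) (deletions : List Int) (out : Option String) : Prop := out = mutsAnnotationString_py_alt substitutions deletions
instance (substitutions : List Int) (deletions : List Int) (out : Option String) : Decidable (Spec_mutsAnnotationString_py substitutions deletions out) := by unfold Spec_mutsAnnotationString_py; infer_instance

-- ===== CLAIM (what is proved, stated in full; the proofs are below) =====
def Claim_equal_mutsAnnotationString_py : Prop := ∀ (substitutions : List Int) (deletions : List Int), Dom_mutsAnnotationString_py substitutions deletions → Spec_mutsAnnotationString_py substitutions deletions (mutsAnnotationString_py substitutions deletions)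

-- ===== LEMMAS AND PROOFS =====

-- the key sequence produced by the merge (proof-only shadow of mutsMergeF)
def keyMergeF : Nat → List Int → List Int → List Int
  | 0, _, _ => []
  | _ + 1, [], [] => []
  | n + 1, p :: xs, [] => p :: keyMergeF n xs []
  | n + 1, [], q :: ys => q :: keyMergeF n [] ys
  | n + 1, p :: xs, q :: ys =>
    if p < q then p :: keyMergeF n xs (q :: ys)
    else if q < p then q :: keyMergeF n (p :: xs) ys
    else p :: keyMergeF n xs ys

theorem mem_keyMergeF (a : Int) : ∀ (n : Nat) (xs ys : List Int), xs.length + ys.length ≤ n →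
    (a ∈ keyMergeF n xs ys ↔ a ∈ xs ∨ a ∈ ys) := by
  intro n
  induction n with
  | zero =>
    intro xs ys h
    cases xs <;> cases ys <;> simp_all [keyMergeF]
  | succ n ih =>
    intro xs ys h
    cases xs with
    | nil =>
      cases ys with
      | nil => simp [keyMergeF]
      | cons q ys => simp [keyMergeF, ih [] ys (by simp at h ⊢; omega)]
    | cons p xs =>
      cases ys with
      | nil => simp [keyMergeF, ih xs [] (by simp at h ⊢; omega)]
      | cons q ys =>
        by_cases h1 : p < q
        · simp [keyMergeF, h1, ih xs (q :: ys) (by simp at h ⊢; omega)]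
          tauto
        · by_cases h2 : q < p
          · simp [keyMergeF, h1, h2, ih (p :: xs) ys (by simp at h ⊢; omega)]
            tauto
          · have : p = q := le_antisymm (not_lt.mp h2) (not_lt.mp h1)
            subst this
            simp [keyMergeF, ih xs ys (by simp at h ⊢; omega)]
            tauto

theorem pairwise_keyMergeF : ∀ (n : Nat) (xs ys : List Int), xs.length + ys.length ≤ n →
    xs.Pairwise (· < ·) → ys.Pairwise (· < ·) → (keyMergeF n xs ys).Pairwise (· < ·) := by
  intro n
  induction n with
  | zero =>
    intro xs ys h _ _
    cases xs <;> cases ys <;> simp_all [keyMergeF]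
  | succ n ih =>
    intro xs ys h hx hy
    cases xs with
    | nil =>
      cases ys with
      | nil => simp [keyMergeF]
      | cons q ys =>
        rw [List.pairwise_cons] at hy
        have hb : ([] : List Int).length + ys.length ≤ n := by simp at h ⊢; omega
        rw [keyMergeF, List.pairwise_cons]
        refine ⟨fun a ha => ?_, ih [] ys hb (by simp) hy.2⟩
        rcases (mem_keyMergeF a n [] ys hb).mp ha with h' | h'
        · simp at h'
        · exact hy.1 a h'
    | cons p xs =>
      cases ys with
      | nil =>
        rw [List.pairwise_cons] at hx
        have hb : xs.length + ([] : List Int).length ≤ n := by simp at h ⊢; omega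
        rw [keyMergeF, List.pairwise_cons]
        refine ⟨fun a ha => ?_, ih xs [] hb hx.2 (by simp)⟩
        rcases (mem_keyMergeF a n xs [] hb).mp ha with h' | h'
        · exact hx.1 a h'
        · simp at h'
      | cons q ys =>
        by_cases h1 : p < q
        · rw [List.pairwise_cons] at hx
          have hb : xs.length + (q :: ys).length ≤ n := by simp at h ⊢; omega
          rw [keyMergeF, if_pos h1, List.pairwise_cons]
          refine ⟨fun a ha => ?_, ih xs (q :: ys) hb hx.2 hy⟩
          rcases (mem_keyMergeF a n xs (q :: ys) hb).mp ha with h' | h'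
          · exact hx.1 a h'
          · rcases List.mem_cons.mp h' with rfl | h''
            · exact h1
            · exact lt_trans h1 ((List.pairwise_cons.mp hy).1 a h'')
        · by_cases h2 : q < p
          · rw [List.pairwise_cons] at hy
            have hb : (p :: xs).length + ys.length ≤ n := by simp at h ⊢; omega
            rw [keyMergeF, if_neg h1, if_pos h2, List.pairwise_cons]
            refine ⟨fun a ha => ?_, ih (p :: xs) ys hb hx hy.2⟩
            rcases (mem_keyMergeF a n (p :: xs) ys hb).mp ha with h' | h'
            · rcases List.mem_cons.mp h' with rfl | h''
              · exact h2
              · exact lt_trans h2 ((List.pairwise_cons.mp hx).1 a h'')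
            · exact hy.1 a h'
          · have : p = q := le_antisymm (not_lt.mp h2) (not_lt.mp h1)
            subst this
            rw [List.pairwise_cons] at hx hy
            have hb : xs.length + ys.length ≤ n := by simp at h ⊢; omega
            rw [keyMergeF, if_neg h1, if_neg h2, List.pairwise_cons]
            refine ⟨fun a ha => ?_, ih xs ys hb hx.2 hy.2⟩
            rcases (mem_keyMergeF a n xs ys hb).mp ha with h' | h'
            · exact hx.1 a h'
            · exact hy.1 a h'

-- the merged fragments are exactly the fragments A computes at the merged keys
theorem mutsMergeF_eq_map : ∀ (n : Nat) (xs ys : List Int), xs.length + ys.length ≤ n →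
    xs.Pairwise (· < ·) → ys.Pairwise (· < ·) →
    mutsMergeF n xs ys = (keyMergeF n xs ys).map
      (fun p => PySem.Int.toStr (p + 1) ++ (if p ∈ xs then "S" else "") ++ (if p ∈ ys then "D" else "")) := by
  intro n
  induction n with
  | zero =>
    intro xs ys h _ _
    cases xs <;> cases ys <;> simp_all [keyMergeF, mutsMergeF]
  | succ n ih =>
    intro xs ys h hx hy
    cases xs with
    | nil =>
      cases ys with
      | nil => simp [keyMergeF, mutsMergeF]
      | cons q ys =>
        rw [List.pairwise_cons] at hy
        have hb : ([] : List Int).length + ys.length ≤ n := by simp at h ⊢; omega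
        have hqy : q ∉ ys := fun h' => lt_irrefl q (hy.1 q h')
        rw [mutsMergeF, keyMergeF, List.map_cons, ih [] ys hb (by simp) hy.2]
        congr 1
        · simp
        · apply List.map_congr_left
          intro a ha
          have haq : a ≠ q := by
            rintro rfl
            rcases (mem_keyMergeF a n [] ys hb).mp ha with h' | h'
            · simp at h'
            · exact hqy h'
          simp [List.mem_cons, haq]
    | cons p xs =>
      cases ys with
      | nil =>
        rw [List.pairwise_cons] at hx
        have hb : xs.length + ([] : List Int).length ≤ n := by simp at h ⊢; omega
        have hpx : p ∉ xs := fun h' => lt_irrefl p (hx.1 p h')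
        rw [mutsMergeF, keyMergeF, List.map_cons, ih xs [] hb hx.2 (by simp)]
        congr 1
        · simp
        · apply List.map_congr_left
          intro a ha
          have hap : a ≠ p := by
            rintro rfl
            rcases (mem_keyMergeF a n xs [] hb).mp ha with h' | h'
            · exact hpx h'
            · simp at h'
          simp [List.mem_cons, hap]
      | cons q ys =>
        by_cases h1 : p < q
        · rw [List.pairwise_cons] at hx
          have hyall : ∀ a ∈ q :: ys, p < a := by
            intro a ha
            rcases List.mem_cons.mp ha with rfl | h'
            exacts [h1, lt_trans h1 ((List.pairwise_cons.mp hy).1 a h')]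
          have hb : xs.length + (q :: ys).length ≤ n := by simp at h ⊢; omega
          have hpx : p ∉ xs := fun h' => lt_irrefl p (hx.1 p h')
          have hpy : p ∉ q :: ys := fun h' => lt_irrefl p (hyall p h')
          rw [mutsMergeF, keyMergeF, if_pos h1, if_pos h1, List.map_cons, ih xs (q :: ys) hb hx.2 hy]
          congr 1
          · simp [hpy]
          · apply List.map_congr_left
            intro a ha
            have hap : a ≠ p := by
              rintro rfl
              rcases (mem_keyMergeF a n xs (q :: ys) hb).mp ha with h' | h'
              · exact hpx h'
              · exact hpy h'
            simp [List.mem_cons, hap]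
        · by_cases h2 : q < p
          · rw [List.pairwise_cons] at hy
            have hxall : ∀ a ∈ p :: xs, q < a := by
              intro a ha
              rcases List.mem_cons.mp ha with rfl | h'
              exacts [h2, lt_trans h2 ((List.pairwise_cons.mp hx).1 a h')]
            have hb : (p :: xs).length + ys.length ≤ n := by simp at h ⊢; omega
            have hqy : q ∉ ys := fun h' => lt_irrefl q (hy.1 q h')
            have hqx : q ∉ p :: xs := fun h' => lt_irrefl q (hxall q h')
            rw [mutsMergeF, keyMergeF, if_neg h1, if_pos h2, if_neg h1, if_pos h2,
              List.map_cons, ih (p :: xs) ys hb hx hy.2]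
            congr 1
            · simp [hqx]
            · apply List.map_congr_left
              intro a ha
              have haq : a ≠ q := by
                rintro rfl
                rcases (mem_keyMergeF a n (p :: xs) ys hb).mp ha with h' | h'
                · exact hqx h'
                · exact hqy h'
              simp [List.mem_cons, haq]
          · have : p = q := le_antisymm (not_lt.mp h2) (not_lt.mp h1)
            subst this
            rw [List.pairwise_cons] at hx hy
            have hb : xs.length + ys.length ≤ n := by simp at h ⊢; omega
            have hpx : p ∉ xs := fun h' => lt_irrefl p (hx.1 p h')
            have hpy : p ∉ ys := fun h' => lt_irrefl p (hy.1 p h')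
            rw [mutsMergeF, keyMergeF, if_neg h1, if_neg h2, if_neg h1, if_neg h2,
              List.map_cons, ih xs ys hb hx.2 hy.2]
            congr 1
            · simp
              rw [String.append_assoc]
              rfl
            · apply List.map_congr_left
              intro a ha
              have hap : a ≠ p := by
                rintro rfl
                rcases (mem_keyMergeF a n xs ys hb).mp ha with h' | h'
                · exact hpx h'
                · exact hpy h'
              simp [List.mem_cons, hap]

-- the merged key sequence IS sorted(set(substitutions + deletions))
theorem keyMergeF_eq_sorted_union (substitutions deletions : List Int) :
    PySem.List.sorted (PySem.Set.ofList (substitutions ++ deletions)) (fun x => x) false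
      = keyMergeF ((PySem.List.sorted (PySem.Set.ofList substitutions) (fun x => x) false).length
                     + (PySem.List.sorted (PySem.Set.ofList deletions) (fun x => x) false).length)
                  (PySem.List.sorted (PySem.Set.ofList substitutions) (fun x => x) false)
                  (PySem.List.sorted (PySem.Set.ofList deletions) (fun x => x) false) := by
  apply PySem.List.sorted_eq_of_perm_of_pairwise_lt
  · apply (List.perm_ext_iff_of_nodup ?_ ?_).mpr
    · intro a
      rw [mem_keyMergeF a _ _ _ le_rfl]
      simp [PySem.List.mem_sorted, PySem.Set.mem_ofList]
    · exact (pairwise_keyMergeF _ _ _ le_rfl (PySem.List.sorted_ofList_pairwise_lt _)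
        (PySem.List.sorted_ofList_pairwise_lt _)).imp ne_of_lt
    · exact PySem.Set.nodup_ofList _
  · exact pairwise_keyMergeF _ _ _ le_rfl (PySem.List.sorted_ofList_pairwise_lt _)
      (PySem.List.sorted_ofList_pairwise_lt _)

-- ===== VERDICT (by name: the statement is the Claim_ definition above) =====
theorem mutsAnnotationString_py_spec : Claim_equal_mutsAnnotationString_py := by
  intro substitutions deletions _
  unfold Spec_mutsAnnotationString_py mutsAnnotationString_py mutsAnnotationString_py_alt
  simp only []
  have hmerge := mutsMergeF_eq_map
    ((PySem.List.sorted (PySem.Set.ofList substitutions) (fun x => x) false).length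
      + (PySem.List.sorted (PySem.Set.ofList deletions) (fun x => x) false).length)
    (PySem.List.sorted (PySem.Set.ofList substitutions) (fun x => x) false)
    (PySem.List.sorted (PySem.Set.ofList deletions) (fun x => x) false)
    le_rfl (PySem.List.sorted_ofList_pairwise_lt _) (PySem.List.sorted_ofList_pairwise_lt _)
  have hlist : (PySem.List.sorted (PySem.Set.ofList (substitutions ++ deletions)) (fun x => x) false).foldl
      (fun mutlist pos =>
        if (if pos ∈ substitutions then ("S" : String) else "") ≠ "" ∨ (if pos ∈ deletions then ("D" : String) else "") ≠ ""
        then mutlist ++ [PySem.Int.toStr (pos + 1) ++ (if pos ∈ substitutions then "S" else "") ++ (if pos ∈ deletions then "D" else "")]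
        else mutlist) []
      = mutsMergeF ((PySem.List.sorted (PySem.Set.ofList substitutions) (fun x => x) false).length
                      + (PySem.List.sorted (PySem.Set.ofList deletions) (fun x => x) false).length)
                   (PySem.List.sorted (PySem.Set.ofList substitutions) (fun x => x) false)
                   (PySem.List.sorted (PySem.Set.ofList deletions) (fun x => x) false) := by
    rw [PySem.List.foldl_append_ite
      (p := fun pos => (if pos ∈ substitutions then ("S" : String) else "") ≠ "" ∨ (if pos ∈ deletions then ("D" : String) else "") ≠ "")
      (f := fun pos => PySem.Int.toStr (pos + 1) ++ (if pos ∈ substitutions then "S" else "") ++ (if pos ∈ deletions then "D" else ""))]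
    rw [List.filter_eq_self.mpr, keyMergeF_eq_sorted_union, hmerge]
    · apply List.map_congr_left
      intro a ha
      have := (mem_keyMergeF a _ _ _ le_rfl).mp ha
      simp only [PySem.List.mem_sorted, PySem.Set.mem_ofList] at this
      simp [PySem.List.mem_sorted, PySem.Set.mem_ofList]
    · intro pos hpos
      rw [PySem.List.mem_sorted] at hpos
      rw [PySem.Set.mem_ofList, List.mem_append] at hpos
      rcases hpos with h | h
      · simp [h]
      · by_cases hs : pos ∈ substitutions <;> simp [h, hs]
  simp only [hlist]
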